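-- pv_equiv track=rewrite | github.com/polemon/dither | ordered.py | gen_bayer
-- ===== SOURCE A (Python) =====
-- bayer2x2 = [ [0, 2],
--              [3, 1] ]
--
-- bayer3x3 = [ [0, 5, 2],
--              [7, 4, 8],
--              [3, 6, 1] ]
--
-- bayer5x5 = [ [ 0, 14, 22,  5, 16],
--              [23,  4, 11, 20,  7],
--              [15,  8, 24,  1, 12],
--              [ 3, 17, 13,  9, 21],
--              [19, 10,  2, 18,  6] ]
--
-- def gen_bayer(order = 2):
--     # return minimal matrix
--     if order == 2:
--         return bayer2x2
--     elif order == 3: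
--         return bayer3x3
--     elif order == 5:
--         return bayer5x5
--
--     # recursive call for larger matrices
--     # also, get factor matrix from divisor
--     if order % 5 == 0:
--         prev_bayer = gen_bayer(int(order / 5))
--         factor_m = gen_bayer(5)
--     elif order % 3 == 0:
--         prev_bayer = gen_bayer(int(order / 3))
--         factor_m = gen_bayer(3)
--     elif order % 2 == 0:
--         prev_bayer = gen_bayer(int(order / 2))
--         factor_m = gen_bayer(2)
--     else:
--         raise ValueError("Order must be multiples of 2, 3, and 5 respectively!")
--
--     # prev order factor
--     gen_factor = len(prev_bayer[1])**2
--
--     matrix = [ [0 for x in range(order)] for x in range(order) ]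
--
--     # instead of actual dispersion, this uses a more iterative approach
--     # factor matrix element times order of previous order matrix, plus previous order element = new element
--     for j in range(0, order):
--         for i in range(0, order):
--             prev_xidx = int(i / len(factor_m[1]))
--             prev_yidx = int(j / len(factor_m[1]))
--
--             matrix[j][i] = gen_factor * factor_m[ int(j % len(factor_m[1])) ][ int(i % len(factor_m[1])) ] + prev_bayer[prev_yidx][prev_xidx]
--
--     return matrix
-- ===== SOURCE B (Python) =====
-- bayer2x2 = [ [0, 2],
--              [3, 1] ]
--
-- bayer3x3 = [ [0, 5, 2],
--              [7, 4, 8],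
--              [3, 6, 1] ]
--
-- bayer5x5 = [ [ 0, 14, 22,  5, 16],
--              [23,  4, 11, 20,  7],
--              [15,  8, 24,  1, 12],
--              [ 3, 17, 13,  9, 21],
--              [19, 10,  2, 18,  6] ]
--
-- _base = {2: bayer2x2, 3: bayer3x3, 5: bayer5x5}
--
-- def gen_bayer(order = 2):
--     # minimal matrices (same shared globals as the original)
--     if order == 2:
--         return bayer2x2
--     if order == 3:
--         return bayer3x3
--     if order == 5:
--         return bayer5x5
--
--     # peel the divisor chain iteratively (no recursion, no intermediate matrices)
--     chain = []
--     m = order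
--     while m not in (2, 3, 5):
--         for d in (5, 3, 2):
--             if m % d == 0:
--                 chain.append(d)
--                 m //= d
--                 break
--         else:
--             raise ValueError("Order must be multiples of 2, 3, and 5 respectively!")
--
--     # each cell is a mixed-radix weighted sum of base-matrix entries, computed directly
--     def cell(j, i):
--         total, jj, ii, mm = 0, j, i, order
--         for d in chain:
--             mm //= d
--             total += mm * mm * _base[d][jj % d][ii % d]
--             jj //= d
--             ii //= d
--         return total + _base[m][jj][ii]
--
--     return [[cell(j, i) for i in range(order)] for j in range(order)]
-- ===== Notes on version B (the rewrite author's own statement) =====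
-- stated objective: alternative
-- what changed: A builds a matrix at every recursion level and combines each pair with a per-cell double loop over a preallocated zero matrix; B instead peels the divisor chain iteratively in one while loop and then evaluates every output cell directly as a mixed-radix weighted sum of base-matrix entries, materialising no intermediate matrices and using no recursion.
import Mathlib
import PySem

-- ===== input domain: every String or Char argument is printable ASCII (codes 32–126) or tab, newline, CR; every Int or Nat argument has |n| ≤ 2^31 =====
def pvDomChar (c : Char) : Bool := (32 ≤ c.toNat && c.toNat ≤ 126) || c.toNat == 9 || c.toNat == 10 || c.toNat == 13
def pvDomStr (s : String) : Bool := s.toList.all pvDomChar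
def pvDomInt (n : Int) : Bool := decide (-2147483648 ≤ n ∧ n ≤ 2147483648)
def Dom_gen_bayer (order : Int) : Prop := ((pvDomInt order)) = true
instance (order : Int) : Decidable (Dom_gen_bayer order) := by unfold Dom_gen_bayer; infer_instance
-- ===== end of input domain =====

-- B replaces A's recursion (which materialises a matrix at every level and combines it with a
-- per-cell double loop) by an iterative divisor-chain peel followed by a direct per-cell
-- mixed-radix evaluation from the three base matrices, with no intermediate matrices.

-- ===== PORT A =====
def bayer2x2 : List (List Int) := [[0, 2], [3, 1]]

def bayer3x3 : List (List Int) := [[0, 5, 2], [7, 4, 8], [3, 6, 1]]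

def bayer5x5 : List (List Int) :=
  [[ 0, 14, 22,  5, 16],
   [23,  4, 11, 20,  7],
   [15,  8, 24,  1, 12],
   [ 3, 17, 13,  9, 21],
   [19, 10,  2, 18,  6]]

-- the code after the if/elif divisor chain of A (executed once, with prev_bayer/factor_m bound)
def gen_bayer_build (order : Int) (prev_bayer factor_m : List (List Int)) : List (List Int) :=
  -- gen_factor = len(prev_bayer[1])**2
  let gen_factor : Int := ((PySem.List.pyGetD prev_bayer 1 []).length : Int) ^ 2
  -- matrix = [ [0 for x in range(order)] for x in range(order) ]
  let matrix : List (List Int) :=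
    (PySem.List.pyRange 0 order 1).map (fun _ =>
      (PySem.List.pyRange 0 order 1).map (fun _ => (0 : Int)))
  -- for j in range(0, order): for i in range(0, order): matrix[j][i] = …
  -- (the inner loop mutates the row object matrix[j] in place; ported as a fold over that row,
  -- written back once — observationally identical to Python's per-cell aliased mutation)
  (PySem.List.pyRange 0 order 1).foldl (fun m j =>
    PySem.List.pySetD m j
      ((PySem.List.pyRange 0 order 1).foldl (fun row i =>
        let lf : Int := ((PySem.List.pyGetD factor_m 1 []).length : Int)
        -- int(i / len(...)) : exact as floordiv here (operands nonnegative, division exact)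
        let prev_xidx : Int := PySem.Int.floordiv i lf
        let prev_yidx : Int := PySem.Int.floordiv j lf
        PySem.List.pySetD row i
          (gen_factor *
             PySem.List.pyGetD (PySem.List.pyGetD factor_m (PySem.Int.mod j lf) [])
               (PySem.Int.mod i lf) 0
           + PySem.List.pyGetD (PySem.List.pyGetD prev_bayer prev_yidx []) prev_xidx 0))
        (PySem.List.pyGetD m j []))) matrix

-- fuel = recursion depth bound; Python recurses without bound on order = 0 (excluded by Pre_)
def gen_bayer_go : Nat → Int → List (List Int)
  | 0, _ => []                                   -- fuel exhausted: unreachable under Pre_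
  | fuel + 1, order =>
    if order = 2 then bayer2x2
    else if order = 3 then bayer3x3
    else if order = 5 then bayer5x5
    else if PySem.Int.mod order 5 = 0 then
      -- int(order / 5) : exact as floordiv (5 divides order, |order| ≤ 2^31 so / is exact)
      gen_bayer_build order (gen_bayer_go fuel (PySem.Int.floordiv order 5)) (gen_bayer_go fuel 5)
    else if PySem.Int.mod order 3 = 0 then
      gen_bayer_build order (gen_bayer_go fuel (PySem.Int.floordiv order 3)) (gen_bayer_go fuel 3)
    else if PySem.Int.mod order 2 = 0 then
      gen_bayer_build order (gen_bayer_go fuel (PySem.Int.floordiv order 2)) (gen_bayer_go fuel 2)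
    else []                                      -- raise ValueError (excluded by Pre_)

def gen_bayer (order : Int) : List (List Int) := gen_bayer_go order.toNat order

-- ===== PORT B =====
-- _base = {2: bayer2x2, 3: bayer3x3, 5: bayer5x5}; _base[d] (always present on admitted inputs)
def baseOf (d : Int) : List (List Int) :=
  PySem.Dict.getD (PySem.Dict.ofList [(2, bayer2x2), (3, bayer3x3), (5, bayer5x5)]) d []

-- the while loop peeling the divisor chain; fuel bounds the iterations (Python loops forever
-- on order = 0, excluded by Pre_); none = the for/else raise of ValueError (excluded by Pre_)
def peel_go : Nat → Int → Option (List Int × Int)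
  | 0, _ => none
  | fuel + 1, m =>
    if m = 2 ∨ m = 3 ∨ m = 5 then some ([], m)
    else if PySem.Int.mod m 5 = 0 then
      (peel_go fuel (PySem.Int.floordiv m 5)).map (fun cb => (5 :: cb.1, cb.2))
    else if PySem.Int.mod m 3 = 0 then
      (peel_go fuel (PySem.Int.floordiv m 3)).map (fun cb => (3 :: cb.1, cb.2))
    else if PySem.Int.mod m 2 = 0 then
      (peel_go fuel (PySem.Int.floordiv m 2)).map (fun cb => (2 :: cb.1, cb.2))
    else none

-- one iteration of cell's for loop: state (total, jj, ii, mm)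
def cellStep (st : Int × Int × Int × Int) (d : Int) : Int × Int × Int × Int :=
  let mm := PySem.Int.floordiv st.2.2.2 d
  (st.1 + mm * mm *
     PySem.List.pyGetD (PySem.List.pyGetD (baseOf d) (PySem.Int.mod st.2.1 d) [])
       (PySem.Int.mod st.2.2.1 d) 0,
   PySem.Int.floordiv st.2.1 d, PySem.Int.floordiv st.2.2.1 d, mm)

-- def cell(j, i): … per-cell mixed-radix evaluation over the chain
def cellB (order : Int) (chain : List Int) (m j i : Int) : Int :=
  let s := chain.foldl cellStep (0, j, i, order)
  s.1 + PySem.List.pyGetD (PySem.List.pyGetD (baseOf m) s.2.1 []) s.2.2.1 0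

def gen_bayer_alt (order : Int) : List (List Int) :=
  if order = 2 then bayer2x2
  else if order = 3 then bayer3x3
  else if order = 5 then bayer5x5
  else
    match peel_go order.toNat order with
    | some (chain, m) =>
        (PySem.List.pyRange 0 order 1).map (fun j =>
          (PySem.List.pyRange 0 order 1).map (fun i => cellB order chain m j i))
    | none => []

-- ===== PRECONDITION & SPEC =====
-- Pre_ excludes exactly the inputs on which Python A does not return: order < 2 (ValueError,
-- or unbounded recursion at order = 0) and orders with a prime factor other than 2, 3, 5
-- (ValueError). 'order ∣ 30^31' (30 = 2·3·5) states 5-smoothness in a kernel-decidable way: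
-- within the domain |order| ≤ 2^31 every 5-smooth order has each prime exponent ≤ 31 and so
-- divides 30^31 — no input of the domain on which A returns is excluded.
def Pre_gen_bayer (order : Int) : Prop :=
  2 ≤ order ∧ order ∣ 30 ^ 31

instance (order : Int) : Decidable (Pre_gen_bayer order) := by unfold Pre_gen_bayer; infer_instance

def pvWitness_gen_bayer : Int := (6)

def Spec_gen_bayer (order : Int) (out : List (List Int)) : Prop := out = gen_bayer_alt order
instance (order : Int) (out : List (List Int)) : Decidable (Spec_gen_bayer order out) := by
  unfold Spec_gen_bayer; infer_instance

-- ===== CLAIM (what is proved, stated in full; the proofs are below) =====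
def Claim_equal_gen_bayer : Prop :=
  ∀ (order : Int), Dom_gen_bayer order → Pre_gen_bayer order → Spec_gen_bayer order (gen_bayer order)

-- ===== LEMMAS AND PROOFS =====

-- shapes: a square matrix of side n
def Sq (m : List (List Int)) (n : Nat) : Prop :=
  m.length = n ∧ ∀ r ∈ m, r.length = n

-- the matrix B builds once peel has produced (chain, m)
def matOf (order : Int) (chain : List Int) (m : Int) : List (List Int) :=
  (PySem.List.pyRange 0 order 1).map (fun j =>
    (PySem.List.pyRange 0 order 1).map (fun i => cellB order chain m j i))

def cellV (P F : List (List Int)) (g : Int) (f : Nat) (j i : Nat) : Int :=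
  g * ((F.getD (j % f) []).getD (i % f) 0) + ((P.getD (j / f) []).getD (i / f) 0)

-- generic: writing v k at every index k < n of a list, left to right
theorem foldl_set_range {α : Type} (v : Nat → α) :
    ∀ (n : Nat) (row : List α), n ≤ row.length →
      (List.range n).foldl (fun r k => r.set k (v k)) row
        = (List.range n).map v ++ row.drop n := by
  intro n
  induction n with
  | zero => intro row _; simp
  | succ m ih =>
      intro row h
      rw [List.range_succ, List.foldl_append, ih row (by omega)]
      have hlen : ((List.range m).map v).length = m := by simp
      rw [List.drop_eq_getElem_cons (show m < row.length by omega),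
          List.map_append, List.foldl_cons, List.foldl_nil,
          List.set_append_right _ _ (by omega), hlen, Nat.sub_self,
          List.set_cons_zero]
      simp

-- the outer loop: row j is fetched, filled by the inner loop, and written back
theorem outer_fold (n : Nat) (v : Nat → Nat → Int) :
    ∀ (k : Nat) (m : List (List Int)), k ≤ m.length → (∀ r ∈ m, r.length = n) →
      (List.range k).foldl (fun m j =>
          m.set j ((List.range n).foldl (fun r i => r.set i (v j i)) (m.getD j []))) m
        = (List.range k).map (fun j => (List.range n).map (v j)) ++ m.drop k := by
  intro k
  induction k with
  | zero => intro m _ _; simp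
  | succ t ih =>
      intro m hk hr
      rw [List.range_succ, List.foldl_append, ih m (by omega) hr]
      have hlt : t < m.length := by omega
      have hmem : m[t] ∈ m := List.getElem_mem _
      have hlen : ((List.range t).map (fun j => (List.range n).map (v j))).length = t := by simp
      rw [List.drop_eq_getElem_cons hlt, List.map_append, List.foldl_cons, List.foldl_nil]
      have hget : (((List.range t).map (fun j => (List.range n).map (v j))) ++
            m[t] :: m.drop (t + 1)).getD t [] = m[t] := by
        rw [List.getD_eq_getElem?_getD, List.getElem?_append_right (by omega), hlen, Nat.sub_self]
        rfl
      rw [hget, List.set_append_right _ _ (by omega), hlen, Nat.sub_self,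
          foldl_set_range _ n _ (hr _ hmem).ge,
          List.drop_eq_nil_of_le (as := m[t]) (hr _ hmem).le,
          List.set_cons_zero]
      simp

theorem a_build_canon (P F : List (List Int)) (p f : Nat) (hp2 : 2 ≤ p) (hf2 : 2 ≤ f)
    (hP : Sq P p) (hF : Sq F f) :
    gen_bayer_build (((p * f : Nat) : Int)) P F
      = (List.range (p * f)).map
          (fun j => (List.range (p * f)).map (cellV P F (((p : Int)) ^ 2) f j)) := by
  obtain ⟨hPl, hPr⟩ := hP
  obtain ⟨hFl, hFr⟩ := hF
  have hgf : (PySem.List.pyGetD P 1 []).length = p := by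
    rw [PySem.List.pyGetD_ofNat' P 1, List.getD_eq_getElem P [] (by omega)]
    exact hPr _ (List.getElem_mem _)
  have hlf : (PySem.List.pyGetD F 1 []).length = f := by
    rw [PySem.List.pyGetD_ofNat' F 1, List.getD_eq_getElem F [] (by omega)]
    exact hFr _ (List.getElem_mem _)
  unfold gen_bayer_build
  simp only [hgf, hlf, PySem.List.pyRange_zero_natCast, List.foldl_map, List.map_map,
    PySem.List.pySetD_natCast, PySem.List.pyGetD_natCast, PySem.Int.mod_natCast,
    PySem.Int.floordiv_natCast, Function.comp_def]
  have hzero : ∀ r ∈ (List.range (p * f)).map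
      (fun _ => (List.range (p * f)).map (fun _ => (0 : Int))), r.length = p * f := by
    intro r hr
    rcases List.mem_map.1 hr with ⟨_, _, rfl⟩
    simp
  rw [outer_fold (p * f)
        (fun j i => ((p : Int)) ^ 2 * (F.getD (j % f) []).getD (i % f) 0
          + (P.getD (j / f) []).getD (i / f) 0) (p * f) _ (by simp) hzero]
  simp [cellV]

-- the accumulator of cell's loop only shifts the total; positions are unaffected
theorem cell_fold_shift (chain : List Int) :
    ∀ (t j i mm : Int),
      chain.foldl cellStep (t, j, i, mm)
        = ((chain.foldl cellStep (0, j, i, mm)).1 + t,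
           (chain.foldl cellStep (0, j, i, mm)).2) := by
  induction chain with
  | nil => intro t j i mm; simp
  | cons d rest ih =>
      intro t j i mm
      simp only [List.foldl_cons, cellStep]
      rw [ih, ih (0 + _)]
      refine Prod.ext ?_ rfl
      show _ = _ + _
      ring

-- unrolling one chain entry of cellB
theorem cellB_cons (order : Int) (d : Int) (rest : List Int) (m j i : Int) :
    cellB order (d :: rest) m j i
      = (PySem.Int.floordiv order d) * (PySem.Int.floordiv order d) *
          PySem.List.pyGetD (PySem.List.pyGetD (baseOf d) (PySem.Int.mod j d) [])
            (PySem.Int.mod i d) 0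
        + cellB (PySem.Int.floordiv order d) rest m
            (PySem.Int.floordiv j d) (PySem.Int.floordiv i d) := by
  unfold cellB
  simp only [List.foldl_cons, cellStep]
  rw [cell_fold_shift]
  ring

theorem matOf_natCast (n : Nat) (chain : List Int) (m : Int) :
    matOf ((n : Nat) : Int) chain m
      = (List.range n).map (fun (j : Nat) =>
          (List.range n).map (fun (i : Nat) =>
            cellB ((n : Nat) : Int) chain m ((j : Nat) : Int) ((i : Nat) : Int))) := by
  unfold matOf
  rw [PySem.List.pyRange_zero_natCast]
  simp [List.map_map, Function.comp_def]

theorem matOf_sq (n : Nat) (chain : List Int) (m : Int) : Sq (matOf ((n : Nat) : Int) chain m) n := by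
  rw [matOf_natCast]
  constructor
  · simp
  · intro r hr
    rcases List.mem_map.1 hr with ⟨_, _, rfl⟩
    simp

-- one recursive step, shared by the three divisor branches
theorem step_eq (fuel : Nat)
    (ih : ∀ order : Int, Pre_gen_bayer order → order.toNat ≤ fuel →
      ∃ chain m, peel_go fuel order = some (chain, m) ∧
        gen_bayer_go fuel order = matOf order chain m)
    (n q d : Nat) (FD : List (List Int)) (hnd : n = q * d) (hq2 : 2 ≤ q) (hd2 : 2 ≤ d)
    (hF : baseOf ((d : Nat) : Int) = FD) (hFSq : Sq FD d)
    (hPq : Pre_gen_bayer ((q : Nat) : Int)) (hfuel : n ≤ fuel + 1) :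
    ∃ chain m, peel_go fuel ((q : Nat) : Int) = some (chain, m) ∧
      gen_bayer_build ((n : Nat) : Int) (gen_bayer_go fuel ((q : Nat) : Int)) FD
        = matOf ((n : Nat) : Int) (((d : Nat) : Int) :: chain) m := by
  have hq_lt : q < n := by
    have : q * 2 ≤ q * d := Nat.mul_le_mul_left _ hd2
    omega
  obtain ⟨chain, m, hpeel, hAq⟩ := ih ((q : Nat) : Int) hPq (by simp; omega)
  refine ⟨chain, m, hpeel, ?_⟩
  rw [hAq, hnd]
  rw [a_build_canon (matOf ((q : Nat) : Int) chain m) FD q d hq2 hd2 (matOf_sq q chain m) hFSq]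
  rw [matOf_natCast (q * d)]
  apply List.map_congr_left
  intro j hj
  rw [List.mem_range] at hj
  apply List.map_congr_left
  intro i hi
  rw [List.mem_range] at hi
  -- unroll one chain entry on the B side
  rw [show (((q * d : Nat) : Int)) = ((q : Nat) : Int) * ((d : Nat) : Int) by push_cast; ring] at *
  rw [cellB_cons]
  have hQ : PySem.Int.floordiv (((q : Nat) : Int) * ((d : Nat) : Int)) ((d : Nat) : Int)
      = ((q : Nat) : Int) := by
    rw [show ((q : Nat) : Int) * ((d : Nat) : Int) = (((q * d : Nat) : Nat) : Int) by push_cast; ring]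
    rw [PySem.Int.floordiv_natCast]
    congr 1
    exact Nat.mul_div_cancel q (by omega)
  have hjd : PySem.Int.floordiv ((j : Nat) : Int) ((d : Nat) : Int) = (((j / d : Nat) : Nat) : Int) :=
    PySem.Int.floordiv_natCast j d
  have hid : PySem.Int.floordiv ((i : Nat) : Int) ((d : Nat) : Int) = (((i / d : Nat) : Nat) : Int) :=
    PySem.Int.floordiv_natCast i d
  have hjm : PySem.Int.mod ((j : Nat) : Int) ((d : Nat) : Int) = (((j % d : Nat) : Nat) : Int) :=
    PySem.Int.mod_natCast j d
  have him : PySem.Int.mod ((i : Nat) : Int) ((d : Nat) : Int) = (((i % d : Nat) : Nat) : Int) :=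
    PySem.Int.mod_natCast i d
  rw [hQ, hjd, hid, hjm, him, hF]
  rw [PySem.List.pyGetD_natCast, PySem.List.pyGetD_natCast]
  -- the P-entry of cellV is the recursive cell value
  have hjq : j / d < q := Nat.div_lt_of_lt_mul (by rw [Nat.mul_comm]; exact hj)
  have hiq : i / d < q := Nat.div_lt_of_lt_mul (by rw [Nat.mul_comm]; exact hi)
  unfold cellV
  rw [matOf_natCast q]
  rw [PySem.List.getD_map_range _ q (j / d) [] hjq,
      PySem.List.getD_map_range _ q (i / d) (0 : Int) hiq]
  ring

theorem main_go (fuel : Nat) :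
    ∀ order : Int, Pre_gen_bayer order → order.toNat ≤ fuel →
      ∃ chain m, peel_go fuel order = some (chain, m) ∧
        gen_bayer_go fuel order = matOf order chain m := by
  induction fuel with
  | zero =>
      intro order hpre hf
      exact absurd hpre.1 (by omega)
  | succ fuel ih =>
      intro order hpre hf
      obtain ⟨h2, h30⟩ := hpre
      by_cases e2 : order = 2
      · subst e2
        refine ⟨[], 2, rfl, ?_⟩
        rw [show gen_bayer_go (fuel + 1) 2 = bayer2x2 from rfl]
        decide
      by_cases e3 : order = 3
      · subst e3
        refine ⟨[], 3, rfl, ?_⟩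
        rw [show gen_bayer_go (fuel + 1) 3 = bayer3x3 from rfl]
        decide
      by_cases e5 : order = 5
      · subst e5
        refine ⟨[], 5, rfl, ?_⟩
        rw [show gen_bayer_go (fuel + 1) 5 = bayer5x5 from rfl]
        decide
      -- recursive case
      set n : Nat := order.toNat with hn_def
      have hn : order = ((n : Nat) : Int) := by omega
      have hn2 : 2 ≤ n := by omega
      have hn30 : n ∣ 30 ^ 31 := by
        have : ((n : Nat) : Int) ∣ ((30 ^ 31 : Nat) : Int) := by
          rw [← hn]; exact_mod_cast h30
        exact_mod_cast this
      have hfuel2 : 2 ≤ fuel + 1 := by omega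
      have hm5 : PySem.Int.mod order 5 = 0 ↔ (5:Nat) ∣ n := by
        rw [PySem.Int.mod_eq_zero_iff_dvd, hn]
        constructor <;> intro h <;> exact_mod_cast h
      have hm3 : PySem.Int.mod order 3 = 0 ↔ (3:Nat) ∣ n := by
        rw [PySem.Int.mod_eq_zero_iff_dvd, hn]
        constructor <;> intro h <;> exact_mod_cast h
      have hm2 : PySem.Int.mod order 2 = 0 ↔ (2:Nat) ∣ n := by
        rw [PySem.Int.mod_eq_zero_iff_dvd, hn]
        constructor <;> intro h <;> exact_mod_cast h
      have hAgo5 : gen_bayer_go fuel 5 = bayer5x5 := by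
        obtain ⟨t, rfl⟩ : ∃ t, fuel = t + 1 := ⟨fuel - 1, by omega⟩
        rfl
      have hAgo3 : gen_bayer_go fuel 3 = bayer3x3 := by
        obtain ⟨t, rfl⟩ : ∃ t, fuel = t + 1 := ⟨fuel - 1, by omega⟩
        rfl
      have hAgo2 : gen_bayer_go fuel 2 = bayer2x2 := by
        obtain ⟨t, rfl⟩ : ∃ t, fuel = t + 1 := ⟨fuel - 1, by omega⟩
        rfl
      by_cases m5 : PySem.Int.mod order 5 = 0
      · have hdvd : (5:Nat) ∣ n := hm5.1 m5
        have hmul : n / 5 * 5 = n := Nat.div_mul_cancel hdvd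
        have hq2 : 2 ≤ n / 5 := by
          by_contra hlt
          have h01 : n / 5 = 0 ∨ n / 5 = 1 := by omega
          rcases h01 with h01 | h01 <;> rw [h01] at hmul
          · omega
          · exact e5 (by omega)
        have hPreq : Pre_gen_bayer ((n/5 : Nat) : Int) := by
          refine ⟨by exact_mod_cast hq2, ?_⟩
          have : (n / 5 : Nat) ∣ (30 ^ 31 : Nat) := (Nat.div_dvd_of_dvd hdvd).trans hn30
          exact_mod_cast this
        obtain ⟨chain, m, hpeelq, hbuild⟩ :=
          step_eq fuel ih n (n/5) 5 bayer5x5 hmul.symm hq2 (by norm_num) (by decide)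
            (by unfold Sq; exact ⟨by decide, by decide⟩) hPreq (by omega)
        have hfd : PySem.Int.floordiv order 5 = ((n/5 : Nat) : Int) := by
          rw [hn]; exact_mod_cast PySem.Int.floordiv_natCast n 5
        refine ⟨(5:Int) :: chain, m, ?_, ?_⟩
        · show peel_go (fuel + 1) order = _
          simp only [peel_go]
          rw [if_neg (by push Not; exact ⟨e2, e3, e5⟩), if_pos m5, hfd, hpeelq]
          rfl
        · show gen_bayer_go (fuel + 1) order = _
          simp only [gen_bayer_go]
          rw [if_neg e2, if_neg e3, if_neg e5, if_pos m5, hfd, hAgo5, hn]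
          exact hbuild
      by_cases m3 : PySem.Int.mod order 3 = 0
      · have hdvd : (3:Nat) ∣ n := hm3.1 m3
        have hmul : n / 3 * 3 = n := Nat.div_mul_cancel hdvd
        have hq2 : 2 ≤ n / 3 := by
          by_contra hlt
          have h01 : n / 3 = 0 ∨ n / 3 = 1 := by omega
          rcases h01 with h01 | h01 <;> rw [h01] at hmul
          · omega
          · exact e3 (by omega)
        have hPreq : Pre_gen_bayer ((n/3 : Nat) : Int) := by
          refine ⟨by exact_mod_cast hq2, ?_⟩
          have : (n / 3 : Nat) ∣ (30 ^ 31 : Nat) := (Nat.div_dvd_of_dvd hdvd).trans hn30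
          exact_mod_cast this
        obtain ⟨chain, m, hpeelq, hbuild⟩ :=
          step_eq fuel ih n (n/3) 3 bayer3x3 hmul.symm hq2 (by norm_num) (by decide)
            (by unfold Sq; exact ⟨by decide, by decide⟩) hPreq (by omega)
        have hfd : PySem.Int.floordiv order 3 = ((n/3 : Nat) : Int) := by
          rw [hn]; exact_mod_cast PySem.Int.floordiv_natCast n 3
        refine ⟨(3:Int) :: chain, m, ?_, ?_⟩
        · show peel_go (fuel + 1) order = _
          simp only [peel_go]
          rw [if_neg (by push Not; exact ⟨e2, e3, e5⟩), if_neg m5, if_pos m3, hfd, hpeelq]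
          rfl
        · show gen_bayer_go (fuel + 1) order = _
          simp only [gen_bayer_go]
          rw [if_neg e2, if_neg e3, if_neg e5, if_neg m5, if_pos m3, hfd, hAgo3, hn]
          exact hbuild
      by_cases m2 : PySem.Int.mod order 2 = 0
      · have hdvd : (2:Nat) ∣ n := hm2.1 m2
        have hmul : n / 2 * 2 = n := Nat.div_mul_cancel hdvd
        have hq2 : 2 ≤ n / 2 := by
          by_contra hlt
          have h01 : n / 2 = 0 ∨ n / 2 = 1 := by omega
          rcases h01 with h01 | h01 <;> rw [h01] at hmul
          · omega
          · exact e2 (by omega)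
        have hPreq : Pre_gen_bayer ((n/2 : Nat) : Int) := by
          refine ⟨by exact_mod_cast hq2, ?_⟩
          have : (n / 2 : Nat) ∣ (30 ^ 31 : Nat) := (Nat.div_dvd_of_dvd hdvd).trans hn30
          exact_mod_cast this
        obtain ⟨chain, m, hpeelq, hbuild⟩ :=
          step_eq fuel ih n (n/2) 2 bayer2x2 hmul.symm hq2 (by norm_num) (by decide)
            (by unfold Sq; exact ⟨by decide, by decide⟩) hPreq (by omega)
        have hfd : PySem.Int.floordiv order 2 = ((n/2 : Nat) : Int) := by
          rw [hn]; exact_mod_cast PySem.Int.floordiv_natCast n 2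
        refine ⟨(2:Int) :: chain, m, ?_, ?_⟩
        · show peel_go (fuel + 1) order = _
          simp only [peel_go]
          rw [if_neg (by push Not; exact ⟨e2, e3, e5⟩), if_neg m5, if_neg m3, if_pos m2, hfd,
            hpeelq]
          rfl
        · show gen_bayer_go (fuel + 1) order = _
          simp only [gen_bayer_go]
          rw [if_neg e2, if_neg e3, if_neg e5, if_neg m5, if_neg m3, if_pos m2, hfd, hAgo2, hn]
          exact hbuild
      · exfalso
        have hne1 : n ≠ 1 := by omega
        have hp := Nat.minFac_prime hne1
        have hdn : n.minFac ∣ n := Nat.minFac_dvd n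
        have hd30 : n.minFac ∣ 30 := hp.dvd_of_dvd_pow (hdn.trans hn30)
        have key : ∀ p < 31, p ∣ 30 → Nat.Prime p → p = 2 ∨ p = 3 ∨ p = 5 := by decide
        rcases key n.minFac (by have := Nat.le_of_dvd (by norm_num) hd30; omega) hd30 hp
          with h | h | h
        · exact m2 (hm2.2 (h ▸ hdn))
        · exact m3 (hm3.2 (h ▸ hdn))
        · exact m5 (hm5.2 (h ▸ hdn))

-- ===== VERDICT (by name: the statement is the Claim_ definition above) =====
theorem gen_bayer_spec : Claim_equal_gen_bayer := by
  intro order _ hpre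
  unfold Spec_gen_bayer gen_bayer gen_bayer_alt
  obtain ⟨chain, m, hpeel, hA⟩ := main_go order.toNat order hpre le_rfl
  by_cases e2 : order = 2
  · subst e2; decide
  by_cases e3 : order = 3
  · subst e3; decide
  by_cases e5 : order = 5
  · subst e5; decide
  rw [hA, if_neg e2, if_neg e3, if_neg e5, hpeel]
  rfl
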